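-- pv_equiv track=rewrite | github.com/wahhajjaved/large_language_maniacs | downloaded_data/ctssb/cache/returnn_99d1bd090cc04acf8d5d8b13d679e196c7243f31_before.py | parse_orthography_into_symbols
-- ===== SOURCE A (Python) =====
-- def parse_orthography_into_symbols(orthography, upper_case_special=True):
--   """
--   For Speech.
--   Parses "hello [HESITATION] there " -> list("hello ") + ["[HESITATION]"] + list(" there ").
--   No pre/post-processing such as:
--   Spaces are kept as-is. No stripping at begin/end. (E.g. trailing spaces are not removed.)
--   No tolower/toupper.
--   Doesn't add [BEGIN]/[END] symbols or so.
--   Any such operations should be done explicitly in an additional function.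
--   :param str orthography: example: "hello [HESITATION] there "
--   :rtype: list[str]
--   """
--   ret = []
--   in_special = 0
--   for c in orthography:
--     if in_special:
--       if c == "[":  # special-special
--         in_special += 1
--         ret[-1] += "["
--       elif c == "]":
--         in_special -= 1
--         ret[-1] += "]"
--       elif upper_case_special:
--         ret[-1] += c.upper()
--       else:
--         ret[-1] += c
--     else:  # not in_special
--       if c == "[":
--         in_special = 1
--         ret += ["["]
--       else:
--         ret += c
--   return ret
-- ===== SOURCE B (Python) =====
-- def parse_orthography_into_symbols(orthography, upper_case_special=True):
--   """Index walk: ordinary chars become single-char symbols; at '[' scan forward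
--   with a depth counter and emit the whole bracketed token as one symbol."""
--   ret = []
--   i = 0
--   n = len(orthography)
--   while i < n:
--     if orthography[i] != "[":
--       ret.append(orthography[i])
--       i += 1
--     else:
--       depth = 0
--       j = i
--       while j < n:
--         if orthography[j] == "[":
--           depth += 1
--         elif orthography[j] == "]":
--           depth -= 1
--         j += 1
--         if depth == 0:
--           break
--       tok = orthography[i:j]
--       ret.append(tok.upper() if upper_case_special else tok)
--       i = j
--   return ret
-- ===== Notes on version B (the rewrite author's own statement) =====
-- stated objective: simpler
-- what changed: Replaces the per-character state machine (in_special counter with repeated ret[-1] += mutation) by an index walk that, at each '[', scans forward once with a depth counter and emits the whole bracketed token in one slice.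
import Mathlib
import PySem

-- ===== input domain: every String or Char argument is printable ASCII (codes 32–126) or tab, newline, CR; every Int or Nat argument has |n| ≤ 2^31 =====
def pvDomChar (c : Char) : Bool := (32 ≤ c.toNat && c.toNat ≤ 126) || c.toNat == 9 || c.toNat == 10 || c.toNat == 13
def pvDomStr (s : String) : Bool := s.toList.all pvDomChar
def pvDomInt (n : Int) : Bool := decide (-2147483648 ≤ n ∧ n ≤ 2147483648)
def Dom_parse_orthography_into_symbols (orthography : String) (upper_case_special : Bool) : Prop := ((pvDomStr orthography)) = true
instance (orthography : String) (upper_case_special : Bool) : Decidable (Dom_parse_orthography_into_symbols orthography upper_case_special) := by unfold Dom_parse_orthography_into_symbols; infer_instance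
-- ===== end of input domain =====

-- B replaces A's per-character state machine (in_special counter, repeated ret[-1] += mutation)
-- by an index walk that at each '[' scans the whole bracketed token once with a depth counter
-- and emits it as one slice; objective: simpler.

-- ===== PORT A =====
-- ret[-1] += s  (A never reaches this with ret = []; on [] we return [], unreachable)
def pvAddLast : List String → String → List String
  | [], _ => []
  | [x], s => [x ++ s]
  | x :: y :: xs, s => x :: pvAddLast (y :: xs) s

-- one iteration of A's for-loop; state is (ret, in_special); `if in_special:` is in_special ≠ 0
def pvStepA (u : Bool) : (List String × Int) → Char → (List String × Int)
  | (ret, k), c =>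
    if k ≠ 0 then
      if c = '[' then (pvAddLast ret "[", k + 1)
      else if c = ']' then (pvAddLast ret "]", k - 1)
      else if u then (pvAddLast ret (PySem.Str.upper (String.ofList [c])), k)
      else (pvAddLast ret (String.ofList [c]), k)
    else
      if c = '[' then (ret ++ ["["], (1 : Int))
      else (ret ++ [String.ofList [c]], k)

def parse_orthography_into_symbols (orthography : String) (upper_case_special : Bool) : List String :=
  (orthography.toList.foldl (pvStepA upper_case_special) ([], 0)).1

-- ===== PORT B =====
-- B's inner while-loop: from depth d consume chars updating the depth counter,
-- stop right after the char that brings it to 0 (or at end of string);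
-- returns (token chars consumed, remaining chars)
def pvScanTok : List Char → Int → List Char × List Char
  | [], _ => ([], [])
  | c :: rest, d =>
    let d' := if c = '[' then d + 1 else if c = ']' then d - 1 else d
    if d' = 0 then ([c], rest)
    else
      let p := pvScanTok rest d'
      (c :: p.1, p.2)

theorem pvScanTok_rest_le : ∀ (l : List Char) (d : Int), (pvScanTok l d).2.length ≤ l.length := by
  intro l
  induction l with
  | nil => intro d; simp [pvScanTok]
  | cons c rest ih =>
    intro d
    simp only [pvScanTok]
    by_cases h : (if c = '[' then d + 1 else if c = ']' then d - 1 else d) = 0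
    · simp [h]
    · simp only [if_neg h]
      simpa using Nat.le_succ_of_le (ih _)

-- tok.upper() if upper_case_special else tok
def pvProc (u : Bool) (t : List Char) : String :=
  if u then PySem.Str.upper (String.ofList t) else String.ofList t

-- B's outer while-loop over the remaining characters
def pvParseB (u : Bool) : List Char → List String
  | [] => []
  | c :: cs =>
    if c = '[' then
      -- at '[', the depth after the first char is 1; scan the rest from depth 1
      let q := pvScanTok cs 1
      pvProc u ('[' :: q.1) :: pvParseB u q.2
    else
      String.ofList [c] :: pvParseB u cs
termination_by l => l.length
decreasing_by
  · exact Nat.lt_succ_of_le (pvScanTok_rest_le cs 1)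
  · simp

def parse_orthography_into_symbols_alt (orthography : String) (upper_case_special : Bool) : List String :=
  pvParseB upper_case_special orthography.toList

-- ===== PRECONDITION & SPEC =====
def Spec_parse_orthography_into_symbols (orthography : String) (upper_case_special : Bool) (out : List String) : Prop := out = parse_orthography_into_symbols_alt orthography upper_case_special
instance (orthography : String) (upper_case_special : Bool) (out : List String) : Decidable (Spec_parse_orthography_into_symbols orthography upper_case_special out) := by unfold Spec_parse_orthography_into_symbols; infer_instance

-- ===== CLAIM (what is proved, stated in full; the proofs are below) =====
def Claim_equal_parse_orthography_into_symbols : Prop := ∀ (orthography : String) (upper_case_special : Bool), Dom_parse_orthography_into_symbols orthography upper_case_special → Spec_parse_orthography_into_symbols orthography upper_case_special (parse_orthography_into_symbols orthography upper_case_special)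

-- ===== LEMMAS AND PROOFS =====

theorem pv_upper_ofList (l : List Char) :
    PySem.Str.upper (String.ofList l) = String.ofList (PySem.Chars.upper l) :=
  String.toList_injective (by simp [PySem.Str.toList_upper])

theorem pvProc_nil (u : Bool) : pvProc u [] = "" := by
  cases u <;> refine String.toList_injective ?_ <;>
    simp [pvProc, PySem.Str.toList_upper] <;> decide

theorem pvProc_cons (u : Bool) (c : Char) (t : List Char) :
    pvProc u (c :: t) = pvProc u [c] ++ pvProc u t := by
  cases u <;>
    simp [pvProc, pv_upper_ofList, PySem.Chars.upper, ← String.ofList_append]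

theorem pvProc_lbracket (u : Bool) : pvProc u ['['] = "[" := by
  cases u <;> refine String.toList_injective ?_ <;>
    simp [pvProc, PySem.Str.toList_upper] <;> decide

theorem pvProc_rbracket (u : Bool) : pvProc u [']'] = "]" := by
  cases u <;> refine String.toList_injective ?_ <;>
    simp [pvProc, PySem.Str.toList_upper] <;> decide

theorem pvAddLast_append (ret : List String) (acc s : String) :
    pvAddLast (ret ++ [acc]) s = ret ++ [acc ++ s] := by
  induction ret with
  | nil => rfl
  | cons r rs ih =>
    cases rs with
    | nil => rfl
    | cons r' rs' => simpa [pvAddLast] using ih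

-- A's loop, run from inside a special token (depth d ≥ 1, current token = last element),
-- finishes the token found by pvScanTok, appends its processed form, continues at depth 0.
theorem pv_chunk (u : Bool) :
    ∀ (l : List Char) (d : Int) (ret : List String) (acc : String), 1 ≤ d →
      (l.foldl (pvStepA u) (ret ++ [acc], d)).1
        = ((pvScanTok l d).2.foldl (pvStepA u) (ret ++ [acc ++ pvProc u (pvScanTok l d).1], 0)).1 := by
  intro l
  induction l with
  | nil =>
    intro d ret acc _
    simp [pvScanTok, pvProc_nil]
  | cons c rest ih =>
    intro d ret acc hd
    have hd0 : ¬ d = 0 := by omega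
    by_cases hc : c = '['
    · subst hc
      have hne : ¬ (d + 1 = 0) := by omega
      have hscan : pvScanTok ('[' :: rest) d
          = ('[' :: (pvScanTok rest (d + 1)).1, (pvScanTok rest (d + 1)).2) := by
        simp [pvScanTok, hne]
      have hstep : pvStepA u (ret ++ [acc], d) '[' = (ret ++ [acc ++ "["], d + 1) := by
        simp [pvStepA, hd0, pvAddLast_append]
      rw [List.foldl_cons, hstep, ih (d + 1) ret (acc ++ "[") (by omega), hscan]
      have hs : (acc ++ "[") ++ pvProc u (pvScanTok rest (d + 1)).1
          = acc ++ pvProc u ('[' :: (pvScanTok rest (d + 1)).1) := by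
        rw [pvProc_cons u '[' (pvScanTok rest (d + 1)).1, pvProc_lbracket]
        exact String.toList_injective (by simp)
      rw [hs]
    · by_cases hc' : c = ']'
      · subst hc'
        have hstep : pvStepA u (ret ++ [acc], d) ']' = (ret ++ [acc ++ "]"], d - 1) := by
          simp [pvStepA, hd0, pvAddLast_append]
        rw [List.foldl_cons, hstep]
        by_cases h1 : d = 1
        · subst h1
          have hscan : pvScanTok (']' :: rest) 1 = ([']'], rest) := by
            simp [pvScanTok]
          rw [hscan]
          have hs : acc ++ "]" = acc ++ pvProc u [']'] := by rw [pvProc_rbracket]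
          rw [hs]
          norm_num
        · have hne : ¬ (d - 1 = 0) := by omega
          have hscan : pvScanTok (']' :: rest) d
              = (']' :: (pvScanTok rest (d - 1)).1, (pvScanTok rest (d - 1)).2) := by
            simp [pvScanTok, hne]
          rw [ih (d - 1) ret (acc ++ "]") (by omega), hscan]
          have hs : (acc ++ "]") ++ pvProc u (pvScanTok rest (d - 1)).1
              = acc ++ pvProc u (']' :: (pvScanTok rest (d - 1)).1) := by
            rw [pvProc_cons u ']' (pvScanTok rest (d - 1)).1, pvProc_rbracket]
            exact String.toList_injective (by simp)
          rw [hs]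
      · have hstep : pvStepA u (ret ++ [acc], d) c = (ret ++ [acc ++ pvProc u [c]], d) := by
          cases u <;> simp [pvStepA, hd0, hc, hc', pvAddLast_append, pvProc]
        have hscan : pvScanTok (c :: rest) d
            = (c :: (pvScanTok rest d).1, (pvScanTok rest d).2) := by
          simp [pvScanTok, hc, hc', hd0]
        rw [List.foldl_cons, hstep, ih d ret (acc ++ pvProc u [c]) hd, hscan]
        have hs : (acc ++ pvProc u [c]) ++ pvProc u (pvScanTok rest d).1
            = acc ++ pvProc u (c :: (pvScanTok rest d).1) := by
          rw [pvProc_cons u c (pvScanTok rest d).1]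
          exact String.toList_injective (by simp)
        rw [hs]

theorem pv_main (u : Bool) :
    ∀ (l : List Char) (ret : List String),
      (l.foldl (pvStepA u) (ret, 0)).1 = ret ++ pvParseB u l := by
  intro l
  induction hn : l.length using Nat.strong_induction_on generalizing l with
  | _ n ih =>
    cases l with
    | nil => intro ret; simp [pvParseB]
    | cons c cs =>
      intro ret
      by_cases hc : c = '['
      · subst hc
        have hstep : pvStepA u (ret, 0) '[' = (ret ++ ["["], 1) := by
          simp [pvStepA]
        rw [List.foldl_cons, hstep, pv_chunk u cs 1 ret "[" (by omega)]
        have hlen : (pvScanTok cs 1).2.length < n := by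
          subst hn
          exact Nat.lt_succ_of_le (pvScanTok_rest_le cs 1)
        rw [ih _ hlen (pvScanTok cs 1).2 rfl]
        have hs : ("[" : String) ++ pvProc u (pvScanTok cs 1).1
            = pvProc u ('[' :: (pvScanTok cs 1).1) := by
          rw [pvProc_cons u '[' (pvScanTok cs 1).1, pvProc_lbracket]
        rw [hs]
        simp [pvParseB]
      · have hstep : pvStepA u (ret, 0) c = (ret ++ [String.ofList [c]], 0) := by
          simp [pvStepA, hc]
        rw [List.foldl_cons, hstep]
        have hlen : cs.length < n := by subst hn; simp
        rw [ih _ hlen cs rfl]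
        simp [pvParseB, hc]

-- ===== VERDICT (by name: the statement is the Claim_ definition above) =====
theorem parse_orthography_into_symbols_spec : Claim_equal_parse_orthography_into_symbols := by
  intro orthography upper_case_special _
  unfold Spec_parse_orthography_into_symbols parse_orthography_into_symbols parse_orthography_into_symbols_alt
  simpa using pv_main upper_case_special orthography.toList []
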